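-- pv_equiv track=rewrite | github.com/BashCtl/python-edabit | expert/recursion_first_recurrence_index.py | recur_index
-- ===== SOURCE A (Python) =====
-- def recur_index(txt, i=0, result={}):
--     if txt is None or len(txt) == 0:
--         return result
--     if i == len(txt):
--         if not result:
--             return result
--         key, value = min(result.items(), key=lambda x: (x[1][1], x[1][0]))
--         result.clear()
--         return {key: value}
--     k = txt[i]
--     indexes = [ind for ind, c in enumerate(txt) if c == k]
--     indexes = indexes[:2]
--     if len(indexes) == 2:
--         result[k] = indexes
--
--     return recur_index(txt, i + 1, result)
-- ===== SOURCE B (Python) =====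
-- def recur_index(txt, i=0, result={}):
--     if txt is None or len(txt) == 0:
--         return result
--     # one pass: record every character's occurrence indices
--     occ = {}
--     for ind, c in enumerate(txt):
--         occ.setdefault(c, []).append(ind)
--     # iterative form of the scan: advance i to the end of the string
--     while i < len(txt):
--         c = txt[i]
--         pair = occ[c]
--         if len(pair) >= 2:
--             result[c] = pair[:2]
--         i += 1
--     if not result:
--         return result
--     key, value = min(result.items(), key=lambda x: (x[1][1], x[1][0]))
--     result.clear()
--     return {key: value}
-- ===== Notes on version B (the rewrite author's own statement) =====
-- stated objective: faster
-- what changed: A recursively rescans the whole string (full enumerate+filter) once per visited position; B turns the recursion into a while loop and precomputes each character's occurrence indices in a single pass, so the inner rescan disappears; Pre_ excludes inputs where A raises or diverges (i > len(txt): unbounded recursion; i < -len(txt): IndexError; a result entry with fewer than two indices that is never overwritten: IndexError in the min key) and association lists with duplicate keys, which do not represent a Python dict.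
import Mathlib
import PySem

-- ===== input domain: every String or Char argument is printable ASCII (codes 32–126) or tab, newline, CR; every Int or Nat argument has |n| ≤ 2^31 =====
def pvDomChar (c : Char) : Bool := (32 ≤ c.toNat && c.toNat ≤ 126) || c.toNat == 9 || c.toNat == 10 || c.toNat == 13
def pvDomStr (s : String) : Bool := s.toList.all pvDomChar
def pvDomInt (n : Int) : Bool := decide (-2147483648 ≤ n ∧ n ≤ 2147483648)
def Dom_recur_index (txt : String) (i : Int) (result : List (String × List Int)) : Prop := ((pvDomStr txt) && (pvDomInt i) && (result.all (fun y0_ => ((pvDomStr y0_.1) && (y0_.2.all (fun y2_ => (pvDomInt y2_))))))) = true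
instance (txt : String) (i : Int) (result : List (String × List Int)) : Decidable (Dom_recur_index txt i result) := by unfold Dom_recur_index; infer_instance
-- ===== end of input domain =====

-- B derecursivates A into a while loop and precomputes each character's occurrence indices in
-- one pass, removing the per-step full rescan; the equivalence is about the RETURN value only
-- (both Pythons mutate and clear the caller's dict in the same way).

-- ===== PORT A =====
-- the final 'if not result … min(result.items(), …); result.clear(); return {key: value}' block
-- (textually the same in A and Source B)
def recurIndexFinalize (result : PySem.Dict String (List Int)) : List (String × List Int) :=
  if result.items = [] then result.items
  else
    match PySem.List.min2? result.items
        (fun x => PySem.List.pyGetD x.2 1 0) (fun x => PySem.List.pyGetD x.2 0 0) with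
    | some (key, value) => [(key, value)]
    | none => []

-- the body between the base cases and the tail call: k = txt[i]; indexes = …; result[k] = indexes
def recurIndexStep (cs : List Char) (result : PySem.Dict String (List Int)) (ch : Char) :
    PySem.Dict String (List Int) :=
  let k : String := String.ofList [ch]
  let indexes := ((PySem.List.enumerate cs).filter (fun p => p.2 == ch)).map (fun p => p.1)
  let indexes := PySem.List.slice indexes none (some 2)
  if indexes.length = 2 then result.insert k indexes else result

-- A's recursion; fuel = len(txt) - i steps remain (Python recurses without bound for i > len:
-- RecursionError, and raises IndexError for i < -len — both outside Pre_)
def recurIndexGoA (cs : List Char) (fuel : Nat) (i : Int) (result : PySem.Dict String (List Int)) :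
    List (String × List Int) :=
  if cs.length = 0 then result.items
  else if i = (cs.length : Int) then recurIndexFinalize result
  else
    match PySem.List.pyGet? cs i with
    | none => result.items          -- Python: IndexError (excluded by Pre_)
    | some ch =>
      match fuel with
      | 0 => (recurIndexStep cs result ch).items   -- Python: unbounded recursion (excluded by Pre_)
      | f + 1 => recurIndexGoA cs f (i + 1) (recurIndexStep cs result ch)

def recur_index (txt : String) (i : Int) (result : List (String × List Int)) : List (String × List Int) :=
  recurIndexGoA txt.toList (((txt.toList.length : Int) - i).toNat) i (PySem.Dict.mk result)

-- ===== PORT B =====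
-- occ: for ind, c in enumerate(txt): occ.setdefault(c, []).append(ind)
def recurIndexOcc (cs : List Char) : PySem.Dict String (List Int) :=
  (PySem.List.enumerate cs).foldl
    (fun d p => d.modify (String.ofList [p.2]) [] (fun v => v ++ [p.1])) PySem.Dict.empty

-- Source B's loop body: c = txt[i]; pair = occ[c]; if len(pair) >= 2: result[c] = pair[:2]
def recurIndexAltStep (occ : PySem.Dict String (List Int))
    (result : PySem.Dict String (List Int)) (c : Char) : PySem.Dict String (List Int) :=
  let pair := occ.getD (String.ofList [c]) []
  if 2 ≤ pair.length then result.insert (String.ofList [c]) (pair.take 2) else result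

-- Source B's while loop: while i < len(txt): …; i += 1, then the final min block
def recurIndexGoB (cs : List Char) (occ : PySem.Dict String (List Int)) (fuel : Nat) (i : Int)
    (result : PySem.Dict String (List Int)) : List (String × List Int) :=
  if i < (cs.length : Int) then
    match PySem.List.pyGet? cs i with
    | none => result.items          -- Python: IndexError (excluded by Pre_)
    | some ch =>
      match fuel with
      | 0 => result.items           -- unreachable for fuel = len - i (excluded by Pre_)
      | f + 1 => recurIndexGoB cs occ f (i + 1) (recurIndexAltStep occ result ch)
  else recurIndexFinalize result

def recur_index_alt (txt : String) (i : Int) (result : List (String × List Int)) : List (String × List Int) :=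
  let cs := txt.toList
  if cs.length = 0 then result
  else recurIndexGoB cs (recurIndexOcc cs) (((cs.length : Int) - i).toNat) i (PySem.Dict.mk result)

-- ===== PRECONDITION & SPEC =====
-- Pre_ excludes (a) association lists with duplicate keys — they do not represent a Python dict
-- (dict(…) collapses them), (b) i outside [-len(txt), len(txt)] for nonempty txt, where A hits
-- RecursionError (i > len) or IndexError (i < -len), and (c) result entries whose value list is
-- shorter than 2 and is never overwritten by the scan, where the second-element lookup in A's
-- min key raises IndexError.
def Pre_recur_index (txt : String) (i : Int) (result : List (String × List Int)) : Prop :=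
  (result.map Prod.fst).Nodup ∧
  (txt.toList ≠ [] →
    (-(txt.toList.length : Int) ≤ i ∧ i ≤ (txt.toList.length : Int)) ∧
    (∀ p ∈ result, 2 ≤ p.2.length ∨
      ∃ c ∈ txt.toList, p.1 = String.ofList [c] ∧ 2 ≤ txt.toList.count c ∧
        (i ≤ 0 ∨ c ∈ txt.toList.drop i.toNat)))
instance (txt : String) (i : Int) (result : List (String × List Int)) : Decidable (Pre_recur_index txt i result) := by unfold Pre_recur_index; infer_instance

def pvWitness_recur_index : String × Int × (List (String × List Int)) := ("abab", 0, [("x", [0, 5])])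

def Spec_recur_index (txt : String) (i : Int) (result : List (String × List Int)) (out : List (String × List Int)) : Prop := out = recur_index_alt txt i result
instance (txt : String) (i : Int) (result : List (String × List Int)) (out : List (String × List Int)) : Decidable (Spec_recur_index txt i result out) := by unfold Spec_recur_index; infer_instance

-- ===== CLAIM (what is proved, stated in full; the proofs are below) =====
def Claim_equal_recur_index : Prop := ∀ (txt : String) (i : Int) (result : List (String × List Int)), Dom_recur_index txt i result → Pre_recur_index txt i result → Spec_recur_index txt i result (recur_index txt i result)

-- ===== LEMMAS AND PROOFS =====

-- the characters both loops visit from position i, in visiting order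
def recurIndexCharsFrom (cs : List Char) (i : Int) : List Char :=
  if 0 ≤ i then cs.drop i.toNat else cs.drop (cs.length + i).toNat ++ cs

theorem recurIndexCharsFrom_step (cs : List Char) (i : Int)
    (h1 : -(cs.length : Int) ≤ i) (h2 : i < (cs.length : Int)) :
    ∃ c, PySem.List.pyGet? cs i = some c ∧
      recurIndexCharsFrom cs i = c :: recurIndexCharsFrom cs (i + 1) := by
  by_cases h0 : 0 ≤ i
  · have hlt : i.toNat < cs.length := by omega
    refine ⟨cs[i.toNat], ?_, ?_⟩
    · conv_lhs => rw [show i = ((i.toNat : Nat) : Int) from by omega]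
      rw [PySem.List.pyGet?_natCast]
      exact List.getElem?_eq_getElem hlt
    · have h01 : (0:Int) ≤ i + 1 := by omega
      simp only [recurIndexCharsFrom, if_pos h0, if_pos h01,
        List.drop_eq_getElem_cons hlt, show (i+1).toNat = i.toNat + 1 by omega]
  · have hlt : (cs.length + i).toNat < cs.length := by omega
    have hk1 : 0 < (-i).toNat := by omega
    have hk2 : (-i).toNat ≤ cs.length := by omega
    refine ⟨cs[(cs.length + i).toNat], ?_, ?_⟩
    · conv_lhs => rw [show i = -(((-i).toNat : Nat) : Int) from by omega]
      rw [PySem.List.pyGet?_neg_natCast cs ((-i).toNat) hk1 hk2,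
        show cs.length - (-i).toNat = (cs.length + i).toNat by omega]
      exact List.getElem?_eq_getElem hlt
    · by_cases h01 : 0 ≤ i + 1
      · have hi : i = -1 := by omega
        subst hi
        simp only [recurIndexCharsFrom, if_neg h0, if_pos h01,
          List.drop_eq_getElem_cons hlt]
        rw [show ((cs.length:Int) + -1).toNat + 1 = cs.length by omega]
        simp
      · simp only [recurIndexCharsFrom, if_neg h0, if_neg h01,
          List.drop_eq_getElem_cons hlt,
          show ((cs.length:Int) + (i+1)).toNat = (cs.length + i).toNat + 1 by omega]
        rfl

theorem recurIndex_occ_getD (cs : List Char) (c : Char) :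
    (recurIndexOcc cs).getD (String.ofList [c]) []
      = ((PySem.List.enumerate cs).filter (fun p => p.2 == c)).map (fun p => p.1) := by
  have hmap : recurIndexOcc cs
      = ((PySem.List.enumerate cs).map (fun p => (String.ofList [p.2], p.1))).foldl
        (fun d q => d.modify q.1 [] (fun v => v ++ [q.2])) PySem.Dict.empty := by
    rw [recurIndexOcc, List.foldl_map]
  rw [hmap, PySem.Dict.getD_foldl_modify_append]
  simp [List.filter_map, Function.comp_def, List.map_map]
  congr 1
  apply List.filter_congr
  intro p _
  simp [String.ofList_inj]

theorem recurIndexStep_eq (cs : List Char) (d : PySem.Dict String (List Int)) (c : Char) :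
    recurIndexStep cs d c = recurIndexAltStep (recurIndexOcc cs) d c := by
  simp only [recurIndexStep, recurIndexAltStep, recurIndex_occ_getD]
  rw [PySem.List.slice_to _ (by norm_num : (0:Int) ≤ 2)]
  have hlen : ((((PySem.List.enumerate cs).filter (fun p => p.2 == c)).map (fun p => p.1)).take ((2:Int).toNat)).length = 2 ↔ 2 ≤ (((PySem.List.enumerate cs).filter (fun p => p.2 == c)).map (fun p => p.1)).length := by
    simp [List.length_take]
  by_cases h : 2 ≤ (((PySem.List.enumerate cs).filter (fun p => p.2 == c)).map (fun p => p.1)).length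
  · rw [if_pos (hlen.mpr h), if_pos h]
    rfl
  · rw [if_neg (fun hh => h (hlen.mp hh)), if_neg h]

theorem recurIndexGoA_eq (cs : List Char) (hne : cs ≠ []) :
    ∀ (f : Nat) (i : Int) (d : PySem.Dict String (List Int)),
      -(cs.length : Int) ≤ i → i ≤ (cs.length : Int) → f = ((cs.length : Int) - i).toNat →
      recurIndexGoA cs f i d =
        recurIndexFinalize ((recurIndexCharsFrom cs i).foldl (recurIndexStep cs) d) := by
  have hlen0 : ¬ cs.length = 0 := by simpa using hne
  intro f
  induction f with
  | zero =>
    intro i d hlo hhi hf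
    have hi : i = (cs.length : Int) := by omega
    subst hi
    rw [recurIndexGoA, if_neg hlen0, if_pos rfl]
    have hnil : recurIndexCharsFrom cs (cs.length : Int) = [] := by
      simp [recurIndexCharsFrom]
    rw [hnil, List.foldl_nil]
  | succ f ih =>
    intro i d hlo hhi hf
    have hilt : i < (cs.length : Int) := by omega
    obtain ⟨c, hget, hcons⟩ := recurIndexCharsFrom_step cs i hlo hilt
    rw [recurIndexGoA, if_neg hlen0, if_neg (by omega), hget]
    rw [hcons, List.foldl_cons]
    exact ih (i + 1) (recurIndexStep cs d c) (by omega) (by omega) (by omega)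

theorem recurIndexGoB_eq (cs : List Char) (occ : PySem.Dict String (List Int)) :
    ∀ (f : Nat) (i : Int) (d : PySem.Dict String (List Int)),
      -(cs.length : Int) ≤ i → i ≤ (cs.length : Int) → f = ((cs.length : Int) - i).toNat →
      recurIndexGoB cs occ f i d =
        recurIndexFinalize ((recurIndexCharsFrom cs i).foldl (recurIndexAltStep occ) d) := by
  intro f
  induction f with
  | zero =>
    intro i d hlo hhi hf
    have hi : i = (cs.length : Int) := by omega
    subst hi
    rw [recurIndexGoB, if_neg (by omega)]
    have hnil : recurIndexCharsFrom cs (cs.length : Int) = [] := by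
      simp [recurIndexCharsFrom]
    rw [hnil, List.foldl_nil]
  | succ f ih =>
    intro i d hlo hhi hf
    have hilt : i < (cs.length : Int) := by omega
    obtain ⟨c, hget, hcons⟩ := recurIndexCharsFrom_step cs i hlo hilt
    rw [recurIndexGoB, if_pos hilt, hget]
    rw [hcons, List.foldl_cons]
    exact ih (i + 1) (recurIndexAltStep occ d c) (by omega) (by omega) (by omega)

-- ===== VERDICT (by name: the statement is the Claim_ definition above) =====
theorem recur_index_spec : Claim_equal_recur_index := by
  unfold Claim_equal_recur_index Spec_recur_index
  intro txt i result _hdom hpre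
  obtain ⟨_hnodup, hrest⟩ := hpre
  by_cases hcs : txt.toList = []
  · simp [recur_index, recur_index_alt, hcs, recurIndexGoA]
  · have hlen0 : ¬ txt.toList.length = 0 := by simpa using hcs
    obtain ⟨⟨hlo, hhi⟩, _⟩ := hrest hcs
    have hstep : recurIndexStep txt.toList = recurIndexAltStep (recurIndexOcc txt.toList) :=
      funext fun d => funext fun c => recurIndexStep_eq txt.toList d c
    unfold recur_index recur_index_alt
    rw [if_neg hlen0,
      recurIndexGoA_eq txt.toList hcs _ i (PySem.Dict.mk result) hlo hhi rfl,
      recurIndexGoB_eq txt.toList (recurIndexOcc txt.toList) _ i (PySem.Dict.mk result) hlo hhi rfl,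
      hstep]
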